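-- pv_equiv track=rewrite | github.com/beckadamtheinventor/BOS | src/data/adrive/src/fs/bin/asmide/genopcodes.py | tob32
-- ===== SOURCE A (Python) =====
-- def tob32(s):
-- 	t = " ABCDEFGHIJLMNOPRSTUXYZ01234567'"
-- 	n = 0
-- 	for c in s:
-- 		if c not in t:
-- 			raise RuntimeError(f"Character {c} not found in base32 table {t}")
-- 		n = n * 32 + t.find(c)
-- 	return n
-- ===== SOURCE B (Python) =====
-- def tob32(s):
-- 	t = " ABCDEFGHIJLMNOPRSTUXYZ01234567'"
-- 	digits = []
-- 	for c in s:
-- 		i = t.find(c)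
-- 		if i < 0:
-- 			raise RuntimeError(f"Character {c} not found in base32 table {t}")
-- 		digits.append(i)
-- 	L = len(digits)
-- 	return sum(d * 32 ** (L - 1 - p) for p, d in enumerate(digits))
-- ===== Notes on version B (the rewrite author's own statement) =====
-- stated objective: alternative
-- what changed: Replaces the single-pass Horner accumulation (n = n*32 + digit) by a collect-then-sum decomposition: first gather all digit indices, then return the closed positional sum of digit * 32**(L-1-pos).
import Mathlib
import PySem

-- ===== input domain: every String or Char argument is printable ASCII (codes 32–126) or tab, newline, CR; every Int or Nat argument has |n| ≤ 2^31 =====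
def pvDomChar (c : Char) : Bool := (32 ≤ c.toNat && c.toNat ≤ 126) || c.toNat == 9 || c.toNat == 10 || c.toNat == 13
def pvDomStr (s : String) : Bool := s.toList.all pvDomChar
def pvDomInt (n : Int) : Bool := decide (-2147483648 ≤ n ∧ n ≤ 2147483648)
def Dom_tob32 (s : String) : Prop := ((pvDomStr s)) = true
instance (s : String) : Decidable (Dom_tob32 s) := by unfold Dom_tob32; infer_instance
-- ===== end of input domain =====

-- B replaces A's Horner accumulation by collect-digits-then-closed-positional-sum (objective: alternative).
-- Both Pythons raise RuntimeError on a character outside the table; Pre_ excludes exactly those inputs.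

-- ===== PORT A =====
-- the base32 table t
def pvTbl : String := " ABCDEFGHIJLMNOPRSTUXYZ01234567'"

-- loop state Option Int: none = the RuntimeError was raised
def tob32 (s : String) : Int :=
  (s.toList.foldl
    (fun acc c => acc.bind fun n =>
      if ¬ (PySem.Str.isIn (String.ofList [c]) pvTbl = true) then none
      else some (n * 32 + PySem.Str.find pvTbl (String.ofList [c])))
    (some 0)).getD 0

-- ===== PORT B =====
-- first loop of Source B: collect digit indices (none = the RuntimeError was raised)
def tob32AltDigits (s : String) : Option (List Int) :=
  s.toList.foldl
    (fun acc c => acc.bind fun ds =>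
      let i := PySem.Str.find pvTbl (String.ofList [c])
      if i < 0 then none else some (ds ++ [i]))
    (some [])

-- sum(d * 32 ** (L - 1 - p) for p, d in enumerate(digits)); the exponent is nonnegative (p < L), so .toNat is exact
def tob32AltSum (ds : List Int) : Int :=
  ((PySem.List.enumerate ds).map
    (fun p => p.2 * 32 ^ (((ds.length : Int) - 1 - p.1).toNat))).sum

def tob32_alt (s : String) : Int :=
  match tob32AltDigits s with
  | none => 0
  | some ds => tob32AltSum ds

-- ===== PRECONDITION & SPEC =====
-- Pre_: every character of s occurs in the table; on any other input BOTH Pythons raise RuntimeError.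
def Pre_tob32 (s : String) : Prop :=
  (s.toList.all (fun c => PySem.Str.isIn (String.ofList [c]) pvTbl)) = true
instance (s : String) : Decidable (Pre_tob32 s) := by unfold Pre_tob32; infer_instance
def pvWitness_tob32 : String := "HELLO"

def Spec_tob32 (s : String) (out : Int) : Prop := out = tob32_alt s
instance (s : String) (out : Int) : Decidable (Spec_tob32 s out) := by unfold Spec_tob32; infer_instance

-- ===== CLAIM (what is proved, stated in full; the proofs are below) =====
def Claim_equal_tob32 : Prop := ∀ (s : String), Dom_tob32 s → Pre_tob32 s → Spec_tob32 s (tob32 s)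

-- ===== LEMMAS AND PROOFS =====

-- abbreviation used only by the proofs
def pvF (c : Char) : Int := PySem.Str.find pvTbl (String.ofList [c])

-- A's loop, under Pre_, is the pure Horner fold
theorem pvA_loop (l : List Char) (h : ∀ c ∈ l, PySem.Str.isIn (String.ofList [c]) pvTbl = true)
    (a : Int) :
    l.foldl
      (fun acc c => acc.bind fun n =>
        if ¬ (PySem.Str.isIn (String.ofList [c]) pvTbl = true) then none
        else some (n * 32 + PySem.Str.find pvTbl (String.ofList [c])))
      (some a)
    = some (l.foldl (fun n c => n * 32 + pvF c) a) := by
  induction l generalizing a with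
  | nil => rfl
  | cons c l ih =>
    have hc : PySem.Str.isIn (String.ofList [c]) pvTbl = true := h c (by simp)
    rw [List.foldl_cons]
    simp only [Option.bind_some]
    rw [if_neg (not_not_intro hc)]
    exact ih (fun d hd => h d (by simp [hd])) _

-- B's first loop, under Pre_, collects the digit list
theorem pvB_loop (l : List Char) (h : ∀ c ∈ l, PySem.Str.isIn (String.ofList [c]) pvTbl = true)
    (ds : List Int) :
    l.foldl
      (fun acc c => acc.bind fun ds =>
        let i := PySem.Str.find pvTbl (String.ofList [c])
        if i < 0 then none else some (ds ++ [i]))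
      (some ds)
    = some (ds ++ l.map pvF) := by
  induction l generalizing ds with
  | nil => simp
  | cons c l ih =>
    have hc : PySem.Str.isIn (String.ofList [c]) pvTbl = true := h c (by simp)
    have hge : ¬ pvF c < 0 := by
      have := (PySem.Str.find_nonneg_iff pvTbl (String.ofList [c])).2
        ((PySem.Str.isIn_iff_infix _ _).1 hc)
      unfold pvF; omega
    rw [List.foldl_cons]
    simp only [Option.bind_some]
    rw [if_neg (by simpa [pvF] using hge)]
    rw [ih (fun d hd => h d (by simp [hd])) _]
    simp [pvF]

-- the positional sum gains one digit on the right
theorem pvSum_append (ds : List Int) (d : Int) :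
    tob32AltSum (ds ++ [d]) = 32 * tob32AltSum ds + d := by
  unfold tob32AltSum
  rw [PySem.List.enumerate_append]
  simp only [List.map_append, List.sum_append, List.length_append, List.length_singleton]
  have h1 : ∀ p ∈ PySem.List.enumerate ds 0,
      p.2 * 32 ^ ((((ds.length + 1 : Nat) : Int) - 1 - p.1).toNat)
      = 32 * (p.2 * 32 ^ (((ds.length : Int) - 1 - p.1).toNat)) := by
    intro p hp
    obtain ⟨k, hk, rfl⟩ := (PySem.List.mem_enumerate_iff ds 0 p).1 hp
    have he : ((((ds.length + 1 : Nat) : Int) - 1 - ((0 : Int) + (k : Int))).toNat)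
        = (((ds.length : Int) - 1 - ((0 : Int) + (k : Int))).toNat) + 1 := by
      push_cast; omega
    simp only [he, pow_succ]
    ring
  rw [List.map_congr_left h1]
  have h2 : ((((ds.length + 1 : Nat) : Int) - 1 - ((0 : Int) + (ds.length : Int))).toNat) = 0 := by
    push_cast; omega
  simp only [PySem.List.enumerate_cons, PySem.List.enumerate_nil, List.map_cons, List.map_nil,
    List.sum_cons, List.sum_nil, h2, pow_zero, mul_one, add_zero]
  rw [show (fun p : Int × Int => 32 * (p.2 * 32 ^ (((ds.length : Int) - 1 - p.1).toNat)))
        = (fun p : Int × Int => (p.2 * 32 ^ (((ds.length : Int) - 1 - p.1).toNat)) * 32) from by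
      funext p; ring]
  rw [List.sum_map_mul_right]
  ring

-- fold over s with lookup = fold over the looked-up digit list
theorem pvFoldl_map (l : List Char) (a : Int) :
    l.foldl (fun n c => n * 32 + pvF c) a = (l.map pvF).foldl (fun n d => n * 32 + d) a := by
  induction l generalizing a with
  | nil => rfl
  | cons c l ih => simp [ih]

-- Horner fold = closed positional sum (the core algorithmic equivalence)
theorem pvHorner (ds : List Int) (a : Int) :
    ds.foldl (fun n d => n * 32 + d) a = a * 32 ^ ds.length + tob32AltSum ds := by
  induction ds using List.reverseRecOn generalizing a with
  | nil => simp [tob32AltSum, PySem.List.enumerate]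
  | append_singleton ds d ih =>
    rw [List.foldl_append, pvSum_append]
    simp only [List.foldl_cons, List.foldl_nil, ih, List.length_append, List.length_singleton]
    ring

-- ===== VERDICT (by name: the statement is the Claim_ definition above) =====
theorem tob32_spec : Claim_equal_tob32 := by
  intro s _ hpre
  have h := List.all_eq_true.1 hpre
  unfold Spec_tob32 tob32 tob32_alt tob32AltDigits
  rw [pvA_loop s.toList h 0, pvB_loop s.toList h []]
  simp only [Option.getD_some, List.nil_append]
  rw [pvFoldl_map, pvHorner]
  simp
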